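-- pv_equiv track=rewrite | github.com/mayank123-max/Leet_Code_Problems | laptop.py | solve
-- ===== SOURCE A (Python) =====
-- def solve(N, array, Q, query):
--     maximum = 0
--     l = []
--     ans = []
--     for i in query:
--         maximum_budget = i[1]
--         for j in array:
--             if j[0] <= maximum_budget:
--                 l.append(array.index(j))
--         for k in l:
--             if array[k][1] > maximum:
--                 maximum = array[k][1]
--         ans.append(maximum)
--     return ans
-- ===== SOURCE B (Python) =====
-- def solve(N, array, Q, query):
--     # One pass per query: keep the running prefix-max budget and the running best
--     # value directly; no index list, no repeated array.index scans, no rescan.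
--     ans = []
--     best = 0
--     bmax = None
--     for q in query:
--         b = q[1]
--         bmax = b if bmax is None else max(bmax, b)
--         for r in array:
--             if r[0] <= bmax and r[1] > best:
--                 best = r[1]
--         ans.append(best)
--     return ans
-- ===== Notes on version B (the rewrite author's own statement) =====
-- stated objective: faster
-- what changed: B drops A's ever-growing index list built with repeated array.index scans and its full rescan per query, and instead keeps a running prefix-max budget plus a running best value, updating them in one direct scan of array per query.
import Mathlib
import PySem

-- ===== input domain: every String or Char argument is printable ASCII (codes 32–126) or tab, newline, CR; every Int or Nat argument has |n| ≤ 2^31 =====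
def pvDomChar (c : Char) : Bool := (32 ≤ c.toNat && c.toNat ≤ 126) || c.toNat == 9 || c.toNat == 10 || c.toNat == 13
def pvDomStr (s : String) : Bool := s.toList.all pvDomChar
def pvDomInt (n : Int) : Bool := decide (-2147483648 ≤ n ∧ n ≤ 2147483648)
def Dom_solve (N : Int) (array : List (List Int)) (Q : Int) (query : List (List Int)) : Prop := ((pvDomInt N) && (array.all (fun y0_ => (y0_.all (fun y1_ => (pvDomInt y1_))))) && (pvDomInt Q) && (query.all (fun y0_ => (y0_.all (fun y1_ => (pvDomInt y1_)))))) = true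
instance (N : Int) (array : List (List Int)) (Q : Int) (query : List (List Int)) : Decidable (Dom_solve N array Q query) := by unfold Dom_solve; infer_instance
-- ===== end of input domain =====

-- B replaces A's accumulated index list (built with repeated array.index scans) and full
-- rescan per query by a running prefix-max budget and one direct scan of array per query.

-- ===== PORT A =====
-- body of A's 'for i in query' loop: the accumulated state is (maximum, l, ans)
def solveStep (array : List (List Int)) (st : Int × List Nat × List Int) (i : List Int) : Int × List Nat × List Int :=
  let maximum_budget := PySem.List.pyGetD i 1 0
  let l := array.foldl (fun l j =>
      if PySem.List.pyGetD j 0 0 ≤ maximum_budget then l ++ [(PySem.List.index? array j).getD 0] else l) st.2.1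
  let maximum := l.foldl (fun m k =>
      if PySem.List.pyGetD (PySem.List.pyGetD array ((k : Nat) : Int) []) 1 0 > m
      then PySem.List.pyGetD (PySem.List.pyGetD array ((k : Nat) : Int) []) 1 0 else m) st.1
  (maximum, l, st.2.2 ++ [maximum])

def solve (N : Int) (array : List (List Int)) (Q : Int) (query : List (List Int)) : List Int :=
  (query.foldl (solveStep array) (0, ([] : List Nat), ([] : List Int))).2.2

-- ===== PORT B =====
-- body of B's 'for q in query' loop: the accumulated state is (bmax, best, ans)
def altStep (array : List (List Int)) (st : Option Int × Int × List Int) (q : List Int) : Option Int × Int × List Int :=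
  let b := PySem.List.pyGetD q 1 0
  let bmax := match st.1 with | none => b | some x => max x b
  let best := array.foldl (fun m r =>
      if PySem.List.pyGetD r 0 0 ≤ bmax ∧ PySem.List.pyGetD r 1 0 > m
      then PySem.List.pyGetD r 1 0 else m) st.2.1
  (some bmax, best, st.2.2 ++ [best])

def solve_alt (N : Int) (array : List (List Int)) (Q : Int) (query : List (List Int)) : List Int :=
  (query.foldl (altStep array) ((none : Option Int), (0 : Int), ([] : List Int))).2.2

-- ===== PRECONDITION & SPEC =====
-- Pre_ excludes exactly the inputs on which Python A raises IndexError (a query row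
-- shorter than 2, an empty array row while query is nonempty, or a 1-element array row
-- affordable under some query budget); Python B raises on exactly the same inputs.
def Pre_solve (N : Int) (array : List (List Int)) (Q : Int) (query : List (List Int)) : Prop :=
  (∀ q ∈ query, 2 ≤ q.length) ∧
  (query ≠ [] → ∀ r ∈ array, 1 ≤ r.length) ∧
  (∀ r ∈ array, r.length = 1 → ∀ q ∈ query, ¬ (PySem.List.pyGetD r 0 0 ≤ PySem.List.pyGetD q 1 0))
instance (N : Int) (array : List (List Int)) (Q : Int) (query : List (List Int)) : Decidable (Pre_solve N array Q query) := by unfold Pre_solve; infer_instance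

def pvWitness_solve : Int × List (List Int) × Int × List (List Int) :=
  (2, [[5, 10], [3, 7]], 2, [[0, 4], [0, 1]])

def Spec_solve (N : Int) (array : List (List Int)) (Q : Int) (query : List (List Int)) (out : List Int) : Prop := out = solve_alt N array Q query
instance (N : Int) (array : List (List Int)) (Q : Int) (query : List (List Int)) (out : List Int) : Decidable (Spec_solve N array Q query out) := by unfold Spec_solve; infer_instance

-- ===== CLAIM (what is proved, stated in full; the proofs are below) =====
def Claim_equal_solve : Prop := ∀ (N : Int) (array : List (List Int)) (Q : Int) (query : List (List Int)), Dom_solve N array Q query → Pre_solve N array Q query → Spec_solve N array Q query (solve N array Q query)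

-- ===== LEMMAS AND PROOFS =====

-- price and value of a row, exactly as the ports read them
def pvPr (r : List Int) : Int := PySem.List.pyGetD r 0 0
def pvPv (r : List Int) : Int := PySem.List.pyGetD r 1 0
-- the value A's l-loop reads at stored index k
def pvLval (array : List (List Int)) (k : Nat) : Int :=
  PySem.List.pyGetD (PySem.List.pyGetD array ((k : Nat) : Int) []) 1 0
-- the max-fold shape shared by both inner loops
def pvFM {α : Type} (f : α → Int) (l : List α) (m : Int) : Int :=
  l.foldl (fun m x => if f x > m then f x else m) m

theorem pvFM_nil {α : Type} (f : α → Int) (m : Int) : pvFM f [] m = m := rfl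

theorem pvFM_cons {α : Type} (f : α → Int) (x : α) (l : List α) (m : Int) :
    pvFM f (x :: l) m = pvFM f l (if f x > m then f x else m) := rfl

theorem pvFM_append {α : Type} (f : α → Int) (l₁ l₂ : List α) (m : Int) :
    pvFM f (l₁ ++ l₂) m = pvFM f l₂ (pvFM f l₁ m) := by
  simp [pvFM, List.foldl_append]

theorem le_pvFM {α : Type} (f : α → Int) (l : List α) (m : Int) : m ≤ pvFM f l m := by
  induction l generalizing m with
  | nil => simp [pvFM_nil]
  | cons x l ih =>
    rw [pvFM_cons]
    refine le_trans ?_ (ih _)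
    split <;> omega

theorem pvFM_of_le {α : Type} (f : α → Int) (l : List α) (m : Int)
    (h : ∀ x ∈ l, f x ≤ m) : pvFM f l m = m := by
  induction l with
  | nil => rfl
  | cons x l ih =>
    rw [pvFM_cons]
    have hx : f x ≤ m := h x (by simp)
    have : (if f x > m then f x else m) = m := by split <;> omega
    rw [this]
    exact ih (fun y hy => h y (by simp [hy]))

theorem pvFM_mem_le {α : Type} (f : α → Int) (l : List α) (m : Int) (x : α)
    (hx : x ∈ l) : f x ≤ pvFM f l m := by
  induction l generalizing m with
  | nil => cases hx
  | cons y l ih =>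
    rw [pvFM_cons]
    rcases List.mem_cons.mp hx with h | h
    · subst h
      refine le_trans ?_ (le_pvFM _ _ _)
      split <;> omega
    · exact ih _ h

theorem pvFM_congr {α : Type} (f g : α → Int) (l : List α) (m : Int)
    (h : ∀ x ∈ l, f x = g x) : pvFM f l m = pvFM g l m := by
  induction l generalizing m with
  | nil => rfl
  | cons x l ih =>
    rw [pvFM_cons, pvFM_cons, h x (by simp)]
    exact ih _ (fun y hy => h y (List.mem_cons_of_mem x hy))

-- A's index-building loop appends exactly the indices of the affordable rows
theorem buildL_eq (array arr : List (List Int)) (mb : Int) (l : List Nat) :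
    arr.foldl (fun l j =>
        if PySem.List.pyGetD j 0 0 ≤ mb then l ++ [(PySem.List.index? array j).getD 0] else l) l
      = l ++ (arr.filter (fun j => pvPr j ≤ mb)).map (fun j => (PySem.List.index? array j).getD 0) := by
  induction arr generalizing l with
  | nil => simp
  | cons j arr ih =>
    by_cases h : pvPr j ≤ mb
    · simp only [List.foldl_cons, List.filter_cons, if_pos (show PySem.List.pyGetD j 0 0 ≤ mb from h)]
      rw [ih]
      simp [h]
    · simp only [List.foldl_cons, List.filter_cons, if_neg (show ¬ PySem.List.pyGetD j 0 0 ≤ mb from h)]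
      rw [ih]
      simp [h]

-- the value stored behind array.index(j) is j's own value
theorem lval_idx (array : List (List Int)) (j : List Int) (hj : j ∈ array) :
    pvLval array ((PySem.List.index? array j).getD 0) = pvPv j := by
  obtain ⟨k, hk⟩ := Option.isSome_iff_exists.mp ((PySem.List.index?_isSome_iff array j).mpr hj)
  obtain ⟨hlt, hget, -⟩ := PySem.List.getElem_of_index?_eq_some hk
  simp only [pvLval, hk, Option.getD_some]
  rw [PySem.List.pyGetD_natCast]
  rw [List.getD_eq_getElem _ _ hlt, hget]
  rfl

-- B's scan is the max-fold over the affordable rows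
theorem altScan_eq (arr : List (List Int)) (bm m : Int) :
    arr.foldl (fun m r =>
        if PySem.List.pyGetD r 0 0 ≤ bm ∧ PySem.List.pyGetD r 1 0 > m
        then PySem.List.pyGetD r 1 0 else m) m
      = pvFM pvPv (arr.filter (fun r => pvPr r ≤ bm)) m := by
  induction arr generalizing m with
  | nil => rfl
  | cons r arr ih =>
    by_cases h : pvPr r ≤ bm
    · simp only [List.foldl_cons, List.filter_cons, if_pos (show decide (pvPr r ≤ bm) = true by simp [h])]
      rw [pvFM_cons]
      by_cases hv : pvPv r > m
      · rw [if_pos ⟨h, hv⟩, if_pos hv, ih]; rfl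
      · rw [if_neg (by rintro ⟨-, h2⟩; exact hv h2), if_neg hv, ih]
    · simp only [List.foldl_cons, List.filter_cons, if_neg (show ¬ decide (pvPr r ≤ bm) = true by simp [h])]
      rw [if_neg (by rintro ⟨h1, -⟩; exact h h1), ih]

-- rows already covered by the old budget bm contribute nothing beyond m
theorem filter_max_eq (bm b : Int) : ∀ (arr : List (List Int)) (m : Int),
    (∀ r ∈ arr, pvPr r ≤ bm → pvPv r ≤ m) →
    pvFM pvPv (arr.filter (fun r => pvPr r ≤ max bm b)) m
      = pvFM pvPv (arr.filter (fun r => pvPr r ≤ b)) m := by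
  intro arr
  induction arr with
  | nil => intro m _; rfl
  | cons r arr ih =>
    intro m h
    have hr := h r (by simp)
    have htail : ∀ x ∈ arr, pvPr x ≤ bm → pvPv x ≤ m := fun x hx => h x (by simp [hx])
    by_cases hb : pvPr r ≤ b
    · have hmax : pvPr r ≤ max bm b := le_trans hb (le_max_right _ _)
      simp only [List.filter_cons, if_pos (show decide (pvPr r ≤ max bm b) = true by simp [hmax]),
        if_pos (show decide (pvPr r ≤ b) = true by simp [hb]), pvFM_cons]
      apply ih
      intro x hx hpx
      have := htail x hx hpx
      split <;> omega
    · by_cases hbm : pvPr r ≤ bm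
      · have hmax : pvPr r ≤ max bm b := le_trans hbm (le_max_left _ _)
        simp only [List.filter_cons, if_pos (show decide (pvPr r ≤ max bm b) = true by simp [hmax]),
          if_neg (show ¬ decide (pvPr r ≤ b) = true by simp [hb]), pvFM_cons]
        have : (if pvPv r > m then pvPv r else m) = m := by
          have := hr hbm; split <;> omega
        rw [this]
        exact ih m htail
      · have hmax : ¬ pvPr r ≤ max bm b := by
          simp only [le_max_iff]; tauto
        simp only [List.filter_cons, if_neg (show ¬ decide (pvPr r ≤ max bm b) = true by simp [hmax]),
          if_neg (show ¬ decide (pvPr r ≤ b) = true by simp [hb])]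
        exact ih m htail

-- the invariant tying A's state (m, l) to B's state (bopt, m)
def pvInv (array : List (List Int)) (bopt : Option Int) (m : Int) (l : List Nat) : Prop :=
  (∀ k ∈ l, pvLval array k ≤ m) ∧
  (∀ bm, bopt = some bm → ∀ r ∈ array, pvPr r ≤ bm → pvPv r ≤ m)

theorem step_main (array : List (List Int)) (i : List Int) (bopt : Option Int)
    (m : Int) (l : List Nat) (ansA ansB : List Int) (h : pvInv array bopt m l) :
    (solveStep array (m, l, ansA) i).1 = (altStep array (bopt, m, ansB) i).2.1
    ∧ (solveStep array (m, l, ansA) i).2.2 = ansA ++ [(solveStep array (m, l, ansA) i).1]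
    ∧ (altStep array (bopt, m, ansB) i).2.2 = ansB ++ [(solveStep array (m, l, ansA) i).1]
    ∧ pvInv array (altStep array (bopt, m, ansB) i).1 (solveStep array (m, l, ansA) i).1
        (solveStep array (m, l, ansA) i).2.1 := by
  obtain ⟨I1, I2⟩ := h
  -- names for the pieces
  set b := PySem.List.pyGetD i 1 0 with hb
  have hL : (solveStep array (m, l, ansA) i).2.1
      = l ++ (array.filter (fun j => pvPr j ≤ b)).map (fun j => (PySem.List.index? array j).getD 0) := by
    simp only [solveStep]
    exact buildL_eq array array b l
  -- A's new maximum as a max-fold over the affordable rows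
  have hMA : (solveStep array (m, l, ansA) i).1
      = pvFM pvPv (array.filter (fun j => pvPr j ≤ b)) m := by
    show pvFM (pvLval array) ((solveStep array (m, l, ansA) i).2.1) m
        = pvFM pvPv (array.filter (fun j => pvPr j ≤ b)) m
    rw [hL, pvFM_append, pvFM_of_le _ _ _ I1]
    rw [show pvFM (pvLval array) ((array.filter (fun j => pvPr j ≤ b)).map (fun j => (PySem.List.index? array j).getD 0)) m
        = pvFM (fun j => pvLval array ((PySem.List.index? array j).getD 0)) (array.filter (fun j => pvPr j ≤ b)) m
      from by simp [pvFM, List.foldl_map]]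
    apply pvFM_congr
    intro j hj
    exact lval_idx array j (List.mem_of_mem_filter hj)
  -- B's new bmax
  set bm' := (match bopt with | none => b | some x => max x b) with hbm'
  have hMB : (altStep array (bopt, m, ansB) i).2.1
      = pvFM pvPv (array.filter (fun r => pvPr r ≤ bm')) m := by
    simp only [altStep]
    exact altScan_eq array bm' m
  have hEq : (solveStep array (m, l, ansA) i).1 = (altStep array (bopt, m, ansB) i).2.1 := by
    rw [hMA, hMB]
    cases hbo : bopt with
    | none => simp [hbm', hbo]
    | some bm =>
      simp only [hbm', hbo]
      exact (filter_max_eq bm b array m (I2 bm hbo)).symm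
  have hmono : m ≤ (solveStep array (m, l, ansA) i).1 := by
    rw [hMA]; exact le_pvFM _ _ _
  refine ⟨hEq, rfl, ?_, ?_, ?_⟩
  · rw [hEq]; rfl
  · -- I1 preserved
    intro k hk
    rw [hL] at hk
    rcases List.mem_append.mp hk with hk | hk
    · exact le_trans (I1 k hk) hmono
    · obtain ⟨j, hj, rfl⟩ := List.mem_map.mp hk
      rw [lval_idx array j (List.mem_of_mem_filter hj), hMA]
      exact pvFM_mem_le _ _ _ _ hj
  · -- I2 preserved
    intro bm hbm r hr hpr
    have hfst : (altStep array (bopt, m, ansB) i).1 = some bm' := rfl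
    rw [hfst] at hbm
    injection hbm with hbm
    subst hbm
    rw [hEq, hMB]
    exact pvFM_mem_le _ _ _ _ (List.mem_filter.mpr ⟨hr, by simp [hpr]⟩)

theorem fold_main (array : List (List Int)) : ∀ (qs : List (List Int)) (bopt : Option Int)
    (m : Int) (l : List Nat) (ans : List Int), pvInv array bopt m l →
    (qs.foldl (solveStep array) (m, l, ans)).2.2 = (qs.foldl (altStep array) (bopt, m, ans)).2.2 := by
  intro qs
  induction qs with
  | nil => intro bopt m l ans _; rfl
  | cons i qs ih =>
    intro bopt m l ans h
    obtain ⟨hEq, hA, hB, hInv⟩ := step_main array i bopt m l ans ans h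
    simp only [List.foldl_cons]
    have hsB : altStep array (bopt, m, ans) i
        = ((altStep array (bopt, m, ans) i).1, (solveStep array (m, l, ans) i).1,
           (solveStep array (m, l, ans) i).2.2) := by
      refine Prod.ext rfl (Prod.ext ?_ ?_)
      · exact hEq.symm
      · rw [hB, hA]
    rw [hsB]
    exact ih (altStep array (bopt, m, ans) i).1 (solveStep array (m, l, ans) i).1
      (solveStep array (m, l, ans) i).2.1 (solveStep array (m, l, ans) i).2.2 hInv

-- ===== VERDICT (by name: the statement is the Claim_ definition above) =====
theorem solve_spec : Claim_equal_solve := by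
  intro N array Q query _ _
  show solve N array Q query = solve_alt N array Q query
  exact fold_main array query none 0 [] []
    ⟨fun k hk => absurd hk (List.not_mem_nil), fun bm h => by cases h⟩
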